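-- pv_equiv track=rewrite | github.com/DmitriySAz/infa_2020_DmitriySAz | lab3/New_crosszeroes.py | coord_check
-- ===== SOURCE A (Python) =====
-- cell_size = 100
--
-- step = 10
--
-- def coord_check(x, y):
--     for column in range(3):
--         for string in range(3):
--             grid_left = step * (column + 1) + cell_size * column
--             grid_right = step * (column + 1) + cell_size * (column + 1)
--             grid_up = step * (string + 1) + cell_size * string
--             grid_down = step * (string + 1) + cell_size * (string + 1)
--             if grid_left <= x <= grid_right and grid_up <= y <= grid_down:
--                 return True
-- ===== SOURCE B (Python) =====
-- def coord_check(x, y):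
--     c = (x - 10) // 110
--     r = (y - 10) // 110
--     if 0 <= c <= 2 and x <= 110 * c + 110 and 0 <= r <= 2 and y <= 110 * r + 110:
--         return True
-- ===== Notes on version B (the rewrite author's own statement) =====
-- stated objective: simpler
-- what changed: Replaces the 3x3 double loop over grid cells with direct floor-division computation of the cell index for each coordinate, checking membership with a single arithmetic test.
import Mathlib
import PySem

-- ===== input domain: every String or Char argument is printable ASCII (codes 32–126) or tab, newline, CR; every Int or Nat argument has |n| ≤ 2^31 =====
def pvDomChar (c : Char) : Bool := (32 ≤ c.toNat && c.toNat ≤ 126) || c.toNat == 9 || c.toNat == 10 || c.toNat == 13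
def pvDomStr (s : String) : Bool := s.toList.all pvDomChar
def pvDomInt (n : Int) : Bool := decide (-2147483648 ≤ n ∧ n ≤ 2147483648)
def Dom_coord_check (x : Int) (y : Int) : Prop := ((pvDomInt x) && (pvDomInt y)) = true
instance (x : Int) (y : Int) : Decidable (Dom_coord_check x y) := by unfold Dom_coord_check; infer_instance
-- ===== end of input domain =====

-- B replaces A's 3x3 double loop with a direct floor-division cell-index computation (objective: simpler).

-- ===== PORT A =====
-- inner 'for string in range(3)' loop
def coordInnerA (x y column : Int) : List Int → Option Bool
  | [] => none
  | s :: rest =>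
    let grid_left := 10 * (column + 1) + 100 * column
    let grid_right := 10 * (column + 1) + 100 * (column + 1)
    let grid_up := 10 * (s + 1) + 100 * s
    let grid_down := 10 * (s + 1) + 100 * (s + 1)
    if (grid_left ≤ x ∧ x ≤ grid_right) ∧ (grid_up ≤ y ∧ y ≤ grid_down) then some true
    else coordInnerA x y column rest

-- outer 'for column in range(3)' loop
def coordOuterA (x y : Int) : List Int → Option Bool
  | [] => none
  | c :: rest =>
    match coordInnerA x y c (PySem.List.pyRange 0 3 1) with
    | some b => some b
    | none => coordOuterA x y rest

def coord_check (x : Int) (y : Int) : Option Bool :=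
  coordOuterA x y (PySem.List.pyRange 0 3 1)

-- ===== PORT B =====
def coord_check_alt (x : Int) (y : Int) : Option Bool :=
  let c := PySem.Int.floordiv (x - 10) 110
  let r := PySem.Int.floordiv (y - 10) 110
  if (0 ≤ c ∧ c ≤ 2) ∧ x ≤ 110 * c + 110 ∧ (0 ≤ r ∧ r ≤ 2) ∧ y ≤ 110 * r + 110 then some true
  else none

-- ===== PRECONDITION & SPEC =====
def Spec_coord_check (x : Int) (y : Int) (out : Option Bool) : Prop := out = coord_check_alt x y
instance (x : Int) (y : Int) (out : Option Bool) : Decidable (Spec_coord_check x y out) := by unfold Spec_coord_check; infer_instance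

-- ===== CLAIM (what is proved, stated in full; the proofs are below) =====
def Claim_equal_coord_check : Prop := ∀ (x : Int) (y : Int), Dom_coord_check x y → Spec_coord_check x y (coord_check x y)

-- ===== LEMMAS AND PROOFS =====
theorem pyRange03 : PySem.List.pyRange 0 3 1 = [0, 1, 2] := by decide

-- ===== VERDICT (by name: the statement is the Claim_ definition above) =====
theorem coord_check_spec : Claim_equal_coord_check := by
  intro x y _
  unfold Spec_coord_check coord_check coord_check_alt
  simp only [pyRange03, coordInnerA, coordOuterA,
    PySem.Int.floordiv_eq_ediv_of_pos (a := x - 10) (by norm_num : (0:Int) < 110),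
    PySem.Int.floordiv_eq_ediv_of_pos (a := y - 10) (by norm_num : (0:Int) < 110)]
  norm_num
  split_ifs <;> first | rfl | omega
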